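-- pv_equiv track=rewrite | github.com/ccctw-ma/leetcode | src/Match/match341-350/23spring.py | adventureCamp
-- ===== SOURCE A (Python) =====
-- from typing import List, Tuple, Union, Optional
--
-- def adventureCamp(expeditions: List[str]) -> int:
--     n = len(expeditions)
--     buc = set(expeditions[0].split("->"))
--     maxFind, ans = 0, -1
--     for i in range(1, n):
--         if len(expeditions[i]) == 0:
--             continue
--         tmp = set(expeditions[i].split("->"))
--         newS = tmp | buc
--         add = len(newS) - len(buc)
--         if add > maxFind:
--             maxFind = add
--             ans = i
--         buc = newS
--     return ans
-- ===== SOURCE B (Python) =====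
-- def adventureCamp(expeditions):
--     # Pass 1: first_occ[token] = earliest (processed) expedition index containing it.
--     first_occ = {}
--     for tok in expeditions[0].split("->"):
--         if tok not in first_occ:
--             first_occ[tok] = 0
--     for i in range(1, len(expeditions)):
--         if len(expeditions[i]) == 0:
--             continue
--         for tok in expeditions[i].split("->"):
--             if tok not in first_occ:
--                 first_occ[tok] = i
--     # Pass 2: counts[i] = number of tokens whose first occurrence is i.
--     counts = {}
--     for idx in first_occ.values():
--         counts[idx] = counts.get(idx, 0) + 1
--     # Pass 3: earliest index with a strictly record-breaking number of new tokens.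
--     maxFind, ans = 0, -1
--     for i in range(1, len(expeditions)):
--         add = counts.get(i, 0)
--         if add > maxFind:
--             maxFind = add
--             ans = i
--     return ans
-- ===== Notes on version B (the rewrite author's own statement) =====
-- stated objective: faster
-- what changed: Replaces A's per-step set union (which copies the growing cumulative set at every expedition) with a single first-occurrence index per token plus a per-index tally and a separate record scan.
-- outside the precondition, e.g. on adventureCamp([]): A raises IndexError, B raises IndexError
import Mathlib
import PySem

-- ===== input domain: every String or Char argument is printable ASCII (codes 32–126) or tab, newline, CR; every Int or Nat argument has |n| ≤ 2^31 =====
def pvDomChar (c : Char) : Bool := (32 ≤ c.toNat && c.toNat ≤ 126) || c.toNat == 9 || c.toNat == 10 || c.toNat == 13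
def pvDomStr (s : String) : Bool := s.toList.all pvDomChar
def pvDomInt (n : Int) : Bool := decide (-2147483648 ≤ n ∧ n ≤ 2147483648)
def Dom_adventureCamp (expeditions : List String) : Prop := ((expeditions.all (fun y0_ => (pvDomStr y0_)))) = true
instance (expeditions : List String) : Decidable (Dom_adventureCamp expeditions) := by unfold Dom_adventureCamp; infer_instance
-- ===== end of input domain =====

-- B replaces A's per-step set union (which copies the growing cumulative set each step) with a first-occurrence index per token plus a per-index tally and a separate record scan; measured faster in a timing run.
-- ===== PORT A =====
-- s.split("->") for the literal nonempty separator "->" (exact: Chars.splitOn is Python's str.split for sep != "")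
def pvSplitArrow (s : String) : List String :=
  (PySem.Chars.splitOn s.toList "->".toList).map String.ofList

-- the 'for i in range(1, n)' loop of A, as structural recursion over the remaining expeditions (i is the current index)
def pvALoop (rest : List String) (buc : PySem.Set String) (maxFind ans i : Int) : Int :=
  match rest with
  | [] => ans
  | e :: rest' =>
    if PySem.Str.len e == 0 then pvALoop rest' buc maxFind ans (i + 1)
    else
      let tmp : PySem.Set String := PySem.Set.ofList (pvSplitArrow e)
      let newS : PySem.Set String := PySem.Set.union tmp buc
      let add : Int := PySem.Set.len newS - PySem.Set.len buc
      if add > maxFind then pvALoop rest' newS add i (i + 1)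
      else pvALoop rest' newS maxFind ans (i + 1)

def adventureCamp (expeditions : List String) : Int :=
  let buc : PySem.Set String :=
    PySem.Set.ofList (pvSplitArrow (PySem.List.pyGetD expeditions 0 ""))
  pvALoop (expeditions.drop 1) buc 0 (-1) 1

-- ===== PORT B =====
-- 'for tok in toks: if tok not in first_occ: first_occ[tok] = i'
def pvSetdefaults (d : PySem.Dict String Int) (toks : List String) (i : Int) : PySem.Dict String Int :=
  toks.foldl (fun d t => if d.contains t then d else d.insert t i) d

-- pass 1 over indices 1..n-1 (skipping empty expeditions), as structural recursion
def pvFOLoop (rest : List String) (d : PySem.Dict String Int) (i : Int) : PySem.Dict String Int :=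
  match rest with
  | [] => d
  | e :: rest' =>
    if PySem.Str.len e == 0 then pvFOLoop rest' d (i + 1)
    else pvFOLoop rest' (pvSetdefaults d (pvSplitArrow e) i) (i + 1)

-- pass 3: the record scan over indices 1..n-1
def pvScanLoop (rest : List String) (counts : PySem.Dict Int Int) (maxFind ans i : Int) : Int :=
  match rest with
  | [] => ans
  | _ :: rest' =>
    let add : Int := counts.getD i 0
    if add > maxFind then pvScanLoop rest' counts add i (i + 1)
    else pvScanLoop rest' counts maxFind ans (i + 1)

def adventureCamp_alt (expeditions : List String) : Int :=
  let d0 := pvSetdefaults PySem.Dict.empty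
    (pvSplitArrow (PySem.List.pyGetD expeditions 0 "")) 0
  let firstOcc := pvFOLoop (expeditions.drop 1) d0 1
  -- pass 2: counts[idx] = counts.get(idx, 0) + 1 over first_occ.values()
  let counts : PySem.Dict Int Int :=
    firstOcc.values.foldl (fun c idx => c.modify idx 0 (· + 1)) PySem.Dict.empty
  pvScanLoop (expeditions.drop 1) counts 0 (-1) 1

-- ===== PRECONDITION & SPEC =====
-- Pre_ excludes only the empty list, on which Python A raises IndexError (expeditions[0]).
def Pre_adventureCamp (expeditions : List String) : Prop := expeditions ≠ []
instance (expeditions : List String) : Decidable (Pre_adventureCamp expeditions) := by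
  unfold Pre_adventureCamp; infer_instance
def pvWitness_adventureCamp : List String := (["a->b", "b->c"])

def Spec_adventureCamp (expeditions : List String) (out : Int) : Prop := out = adventureCamp_alt expeditions
instance (expeditions : List String) (out : Int) : Decidable (Spec_adventureCamp expeditions out) := by unfold Spec_adventureCamp; infer_instance

-- ===== CLAIM (what is proved, stated in full; the proofs are below) =====
def Claim_equal_adventureCamp : Prop := ∀ (expeditions : List String), Dom_adventureCamp expeditions → Pre_adventureCamp expeditions → Spec_adventureCamp expeditions (adventureCamp expeditions)

-- ===== LEMMAS AND PROOFS =====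

-- one 'if tok not in d: d[tok] = i' sweep: values gain m copies of i, keys gain m fresh tokens
theorem pvSetdefaults_spec (toks : List String) (d : PySem.Dict String Int) (i : Int)
    (hknd : d.keys.Nodup) :
    ∃ m : Nat,
      (pvSetdefaults d toks i).values = d.values ++ List.replicate m i ∧
      (pvSetdefaults d toks i).keys.length = d.keys.length + m ∧
      (pvSetdefaults d toks i).keys.Nodup ∧
      (∀ x, x ∈ (pvSetdefaults d toks i).keys ↔ x ∈ d.keys ∨ x ∈ toks) := by
  induction toks generalizing d with
  | nil => exact ⟨0, by simp [pvSetdefaults], by simp [pvSetdefaults], by simpa [pvSetdefaults], by simp [pvSetdefaults]⟩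
  | cons t toks ih =>
    by_cases hct : d.contains t = true
    · have hstep : pvSetdefaults d (t :: toks) i = pvSetdefaults d toks i := by
        simp [pvSetdefaults, hct]
      obtain ⟨m, h1, h2, h3, h4⟩ := ih d hknd
      refine ⟨m, by rw [hstep]; exact h1, by rw [hstep]; exact h2, by rw [hstep]; exact h3, ?_⟩
      intro x
      rw [hstep, h4 x]
      have ht : t ∈ d.keys := (PySem.Dict.contains_iff_mem_keys d t).mp hct
      constructor
      · rintro (h | h)
        · exact Or.inl h
        · exact Or.inr (List.mem_cons_of_mem _ h)
      · rintro (h | h)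
        · exact Or.inl h
        · rcases List.mem_cons.mp h with rfl | h
          · exact Or.inl ht
          · exact Or.inr h
    · have hct' : d.contains t = false := by simpa using hct
      have hstep : pvSetdefaults d (t :: toks) i = pvSetdefaults (d.insert t i) toks i := by
        simp [pvSetdefaults, hct']
      have hkeys : (d.insert t i).keys = d.keys ++ [t] :=
        PySem.Dict.keys_insert_of_not_contains d i hct'
      have hvals : (d.insert t i).values = d.values ++ [i] := by
        simp only [PySem.Dict.values, PySem.Dict.items_insert_of_not_contains d (k := t) i hct', List.map_append, List.map]
      have hnd' : (d.insert t i).keys.Nodup := PySem.Dict.nodup_keys_insert d t i hknd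
      obtain ⟨m, h1, h2, h3, h4⟩ := ih (d.insert t i) hnd'
      refine ⟨m + 1, ?_, ?_, by rw [hstep]; exact h3, ?_⟩
      · rw [hstep, h1, hvals]
        simp [List.replicate_succ, List.append_assoc]
      · rw [hstep, h2, hkeys]
        simp; omega
      · intro x
        rw [hstep, h4 x, hkeys]
        simp [List.mem_append, or_assoc, or_comm, or_left_comm]

-- pass 1 only appends values ≥ the current index
theorem pvFOLoop_values (rest : List String) (d : PySem.Dict String Int) (i : Int)
    (hknd : d.keys.Nodup) :
    ∃ tail : List Int, (pvFOLoop rest d i).values = d.values ++ tail ∧ ∀ v ∈ tail, i ≤ v := by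
  induction rest generalizing d i with
  | nil => exact ⟨[], by simp [pvFOLoop], by simp⟩
  | cons e rest ih =>
    by_cases he : e = ""
    · obtain ⟨tail, h1, h2⟩ := ih d (i + 1) hknd
      exact ⟨tail, by simpa [pvFOLoop, he] using h1, fun v hv => by have := h2 v hv; omega⟩
    · obtain ⟨m, hv1, _, hnd', _⟩ := pvSetdefaults_spec (pvSplitArrow e) d i hknd
      obtain ⟨tail, h1, h2⟩ := ih (pvSetdefaults d (pvSplitArrow e) i) (i + 1) hnd'
      refine ⟨List.replicate m i ++ tail, ?_, ?_⟩
      · rw [show pvFOLoop (e :: rest) d i = pvFOLoop rest (pvSetdefaults d (pvSplitArrow e) i) (i + 1) from by simp [pvFOLoop, he]]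
        rw [h1, hv1, List.append_assoc]
      · intro v hv
        rcases List.mem_append.mp hv with h | h
        · rw [List.eq_of_mem_replicate h]
        · have := h2 v h; omega

-- the joint loop invariant: A's scan over the growing set equals B's scan over the tallies
theorem pv_main
    (rest : List String) (d : PySem.Dict String Int) (s : PySem.Set String)
    (mf ans i : Int) (counts : PySem.Dict Int Int)
    (hs : s.Nodup) (hknd : (PySem.Dict.keys d).Nodup)
    (hk : ∀ x, x ∈ PySem.Dict.keys d ↔ x ∈ s)
    (hv : ∀ v ∈ PySem.Dict.values d, v < i) (hmf : 0 ≤ mf)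
    (hc : ∀ j, counts.getD j 0 = ((pvFOLoop rest d i).values.count j : Int)) :
    pvALoop rest s mf ans i = pvScanLoop rest counts mf ans i := by
  induction rest generalizing d s mf ans i with
  | nil => simp [pvALoop, pvScanLoop]
  | cons e rest ih =>
    by_cases he : e = ""
    · -- skipped expedition: no token has first occurrence i, so B's add is 0 and never beats maxFind
      have hfo : pvFOLoop (e :: rest) d i = pvFOLoop rest d (i + 1) := by
        simp [pvFOLoop, he]
      have hadd : counts.getD i 0 = 0 := by
        rw [hc i, hfo]
        obtain ⟨tail, h1, h2⟩ := pvFOLoop_values rest d (i + 1) hknd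
        rw [h1, List.count_append,
          List.count_eq_zero.mpr (fun hm => absurd (hv i hm) (lt_irrefl i)),
          List.count_eq_zero.mpr (fun hm => by have := h2 i hm; omega)]
        rfl
      have hnot : ¬ (counts.getD i 0 > mf) := by rw [hadd]; omega
      rw [show pvALoop (e :: rest) s mf ans i = pvALoop rest s mf ans (i + 1) from by simp [pvALoop, he],
        show pvScanLoop (e :: rest) counts mf ans i = pvScanLoop rest counts mf ans (i + 1) from by
          simp only [pvScanLoop]; rw [if_neg hnot]]
      exact ih d s mf ans (i + 1) hs hknd hk
        (fun v hmem => by have := hv v hmem; omega) hmf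
        (fun j => by rw [hc j, hfo])
    · -- processed expedition: B's tally at i equals A's size difference
      obtain ⟨m, hvals, hlen, hnd', hmem⟩ := pvSetdefaults_spec (pvSplitArrow e) d i hknd
      have hfo : pvFOLoop (e :: rest) d i
          = pvFOLoop rest (pvSetdefaults d (pvSplitArrow e) i) (i + 1) := by
        simp [pvFOLoop, he]
      have hnds' : (PySem.Set.union (PySem.Set.ofList (pvSplitArrow e)) s).Nodup :=
        PySem.Set.nodup_union _ s (PySem.Set.nodup_ofList _)
      have hlen_s : s.length = (PySem.Dict.keys d).length :=
        (((List.perm_ext_iff_of_nodup hs hknd).mpr (fun x => (hk x).symm))).length_eq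
      have hmem' : ∀ x, x ∈ (pvSetdefaults d (pvSplitArrow e) i).keys ↔
          x ∈ PySem.Set.union (PySem.Set.ofList (pvSplitArrow e)) s := by
        intro x
        rw [hmem x, PySem.Set.mem_union, PySem.Set.mem_ofList, hk x, or_comm]
      have hlen_s' : (PySem.Set.union (PySem.Set.ofList (pvSplitArrow e)) s).length
          = (PySem.Dict.keys d).length + m :=
        ((((List.perm_ext_iff_of_nodup hnds' hnd').mpr
          (fun x => (hmem' x).symm))).length_eq).trans hlen
      have hadd : counts.getD i 0
          = PySem.Set.len (PySem.Set.union (PySem.Set.ofList (pvSplitArrow e)) s)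
            - PySem.Set.len s := by
        rw [hc i, hfo]
        obtain ⟨tail, h1, h2⟩ := pvFOLoop_values rest (pvSetdefaults d (pvSplitArrow e) i) (i + 1) hnd'
        have hz1 : d.values.count i = 0 :=
          List.count_eq_zero.mpr (fun hm => absurd (hv i hm) (lt_irrefl i))
        have hz2 : tail.count i = 0 :=
          List.count_eq_zero.mpr (fun hm => by have := h2 i hm; omega)
        rw [h1, hvals, List.append_assoc, List.count_append, List.count_append,
          hz1, hz2, List.count_replicate_self]
        simp only [PySem.Set.len, hlen_s', hlen_s]
        push_cast
        ring
      have hv' : ∀ v ∈ (pvSetdefaults d (pvSplitArrow e) i).values, v < i + 1 := by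
        intro v hmem2
        rw [hvals] at hmem2
        rcases List.mem_append.mp hmem2 with h | h
        · have := hv v h; omega
        · rw [List.eq_of_mem_replicate h]; omega
      have hc' : ∀ j, counts.getD j 0
          = ((pvFOLoop rest (pvSetdefaults d (pvSplitArrow e) i) (i + 1)).values.count j : Int) :=
        fun j => by rw [hc j, hfo]
      have hA : pvALoop (e :: rest) s mf ans i
          = (if PySem.Set.len (PySem.Set.union (PySem.Set.ofList (pvSplitArrow e)) s) - PySem.Set.len s > mf
             then pvALoop rest (PySem.Set.union (PySem.Set.ofList (pvSplitArrow e)) s)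
               (PySem.Set.len (PySem.Set.union (PySem.Set.ofList (pvSplitArrow e)) s) - PySem.Set.len s) i (i + 1)
             else pvALoop rest (PySem.Set.union (PySem.Set.ofList (pvSplitArrow e)) s) mf ans (i + 1)) := by
        simp [pvALoop, he]
      have hS : pvScanLoop (e :: rest) counts mf ans i
          = (if counts.getD i 0 > mf
             then pvScanLoop rest counts (counts.getD i 0) i (i + 1)
             else pvScanLoop rest counts mf ans (i + 1)) := by
        simp [pvScanLoop]
      rw [hA, hS, ← hadd]
      by_cases hgt : counts.getD i 0 > mf
      · rw [if_pos hgt, if_pos hgt]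
        exact ih (pvSetdefaults d (pvSplitArrow e) i) _ _ i (i + 1)
          hnds' hnd' hmem' hv' (le_of_lt (lt_of_le_of_lt hmf hgt)) hc'
      · rw [if_neg hgt, if_neg hgt]
        exact ih (pvSetdefaults d (pvSplitArrow e) i) _ _ ans (i + 1)
          hnds' hnd' hmem' hv' hmf hc'

-- ===== VERDICT (by name: the statement is the Claim_ definition above) =====
theorem adventureCamp_spec : Claim_equal_adventureCamp := by
  intro es _ _
  unfold Spec_adventureCamp adventureCamp adventureCamp_alt
  obtain ⟨m0, hvals0, _, hnd0, hmem0⟩ :=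
    pvSetdefaults_spec (pvSplitArrow (PySem.List.pyGetD es 0 "")) PySem.Dict.empty 0
      PySem.Dict.nodup_keys_empty
  apply pv_main
  · exact PySem.Set.nodup_ofList _
  · exact hnd0
  · intro x
    rw [hmem0 x, PySem.Set.mem_ofList]
    simp [PySem.Dict.keys_empty]
  · intro v hmemv
    rw [hvals0] at hmemv
    have hne : PySem.Dict.values (PySem.Dict.empty (κ := String) (ν := Int)) = [] := rfl
    rw [hne, List.nil_append] at hmemv
    rw [List.eq_of_mem_replicate hmemv]; omega
  · omega
  · intro j
    rw [PySem.Dict.getD_foldl_modify_add_one]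
    simp [PySem.Dict.getD_empty]
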